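-- pv_equiv track=rewrite | github.com/satya-gupta1/p-verification | p_ext.py | rsub16
-- ===== SOURCE A (Python) =====
-- def rsub16(rs1, rs2):
--     """
--     RSUB16 Instruction: Subtracts 16-bit signed elements of Rs2 from Rs1 in parallel,
--     and then performs an arithmetic right shift by 1 to avoid overflow.
--     Works for both RV32 (x=1..0) and RV64 (x=3..0).
--     """
--     result = 0
--
--     # Loop over 4 half-word elements for RV64, or 2 for RV32
--     for x in range(4):  # Adjust loop for 2 iterations for RV32 if required
--         # Extract 16-bit segments from Rs1 and Rs2
--         rs1_half = (rs1 >> (x * 16)) & 0xFFFF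
--         rs2_half = (rs2 >> (x * 16)) & 0xFFFF
--
--         # Sign extend to 17 bits (to handle signed subtraction)
--         rs1_signed = sign_extend_16_to_17(rs1_half)
--         rs2_signed = sign_extend_16_to_17(rs2_half)
--
--         # Perform signed subtraction
--         res_signed = rs1_signed - rs2_signed
--
--         # Perform arithmetic right shift by 1
--         rd_half = res_signed >> 1
--
--         # Mask the result to ensure it's 16 bits after the shift
--         rd_half = rd_half & 0xFFFF
--
--         # Combine the result into the appropriate position in the final result
--         result |= (rd_half << (x * 16))
--
--     return result
--
-- def sign_extend_16_to_17(value):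
--     """
--     Sign extend a 16-bit value to 17-bit for addition.
--     """
--     if value & 0x8000:  # If the sign bit (bit 15) is 1
--         return value | 0x10000  # Extend to 17-bit by setting the 17th bit
--     else:
--         return value
-- ===== SOURCE B (Python) =====
-- def rsub16(rs1, rs2):
--     # SWAR re-implementation: instead of looping over the four half-words,
--     # pack the even lanes (0,2) and odd lanes (1,3) of each operand into
--     # 32-bit slots of a wide integer as 17-bit sign-extended values, perform
--     # ONE biased wide subtraction per parity (the bias bit above each 17-bit
--     # slot absorbs the borrow so slots cannot interfere), halve the whole
--     # word at once, and unpack/recombine the 16-bit lanes.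
--     def pack17(v):
--         lo = v % 0x10000
--         hi = (v >> 32) % 0x10000
--         return (lo + ((lo >> 15) << 16)) + ((hi + ((hi >> 15) << 16)) << 32)
--
--     def unpack16(v):
--         return v % 0x10000 + (((v >> 32) % 0x10000) << 32)
--
--     BIAS = (1 << 17) + (1 << 49)
--     even = (pack17(rs1) + BIAS - pack17(rs2)) >> 1
--     odd = (pack17(rs1 >> 16) + BIAS - pack17(rs2 >> 16)) >> 1
--     return unpack16(even) + (unpack16(odd) << 16)
-- ===== Notes on version B (the rewrite author's own statement) =====
-- stated objective: alternative
-- what changed: B replaces A's four-iteration per-lane loop (extract, 17-bit sign-extend, subtract, shift, OR back) with a loop-free SWAR computation: even and odd lanes are packed as 17-bit sign-extended values into 32-bit slots of two wide integers, one biased wide subtraction and one wide halving shift per parity process two lanes at once, and the lanes are unpacked and recombined.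
import Mathlib
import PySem

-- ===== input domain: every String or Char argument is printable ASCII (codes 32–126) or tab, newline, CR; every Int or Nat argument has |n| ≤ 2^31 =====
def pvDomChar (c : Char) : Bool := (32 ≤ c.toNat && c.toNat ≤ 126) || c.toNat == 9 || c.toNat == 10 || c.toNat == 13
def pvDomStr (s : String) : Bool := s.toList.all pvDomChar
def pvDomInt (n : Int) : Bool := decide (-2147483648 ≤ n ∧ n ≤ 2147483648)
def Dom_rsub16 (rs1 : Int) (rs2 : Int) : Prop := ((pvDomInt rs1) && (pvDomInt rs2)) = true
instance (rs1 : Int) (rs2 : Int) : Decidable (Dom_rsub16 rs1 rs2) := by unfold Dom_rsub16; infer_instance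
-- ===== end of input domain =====

-- B replaces A's four-iteration per-lane loop with a loop-free SWAR computation:
-- even/odd lanes are packed as 17-bit sign-extended values into 32-bit slots and one
-- biased wide subtraction + one wide halving shift per parity handle two lanes at once
-- (alternative algorithm, not claimed faster).


-- ===== PORT A =====
-- Python's `value & 0x8000` truthiness test and `value | 0x10000` are PySem.Int.band / bor (exact on all ints).
def pvSignExtend16to17 (value : Int) : Int :=
  if PySem.Int.band value 32768 ≠ 0 then PySem.Int.bor value 65536 else value

def rsub16 (rs1 : Int) (rs2 : Int) : Int :=
  (List.range 4).foldl (fun result x =>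
    let rs1_half := PySem.Int.band (rs1 >>> (x * 16)) 65535
    let rs2_half := PySem.Int.band (rs2 >>> (x * 16)) 65535
    let rs1_signed := pvSignExtend16to17 rs1_half
    let rs2_signed := pvSignExtend16to17 rs2_half
    let res_signed := rs1_signed - rs2_signed
    let rd_half := res_signed >>> (1 : Nat)
    let rd_half2 := PySem.Int.band rd_half 65535
    PySem.Int.bor result (rd_half2 <<< (x * 16))) 0

-- ===== PORT B =====
-- Python `%` with the positive literal 0x10000 is PySem.Int.mod; `>>`/`<<` on ints are
-- Int's arithmetic shifts (exact for all ints, incl. negatives).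
def pvPack17 (v : Int) : Int :=
  let lo := PySem.Int.mod v 65536
  let hi := PySem.Int.mod (v >>> (32 : Nat)) 65536
  (lo + ((lo >>> (15 : Nat)) <<< (16 : Nat))) + ((hi + ((hi >>> (15 : Nat)) <<< (16 : Nat))) <<< (32 : Nat))

def pvUnpack16 (v : Int) : Int :=
  PySem.Int.mod v 65536 + ((PySem.Int.mod (v >>> (32 : Nat)) 65536) <<< (32 : Nat))

def rsub16_alt (rs1 : Int) (rs2 : Int) : Int :=
  let bias : Int := ((1 : Int) <<< (17 : Nat)) + ((1 : Int) <<< (49 : Nat))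
  let even := (pvPack17 rs1 + bias - pvPack17 rs2) >>> (1 : Nat)
  let odd := (pvPack17 (rs1 >>> (16 : Nat)) + bias - pvPack17 (rs2 >>> (16 : Nat))) >>> (1 : Nat)
  pvUnpack16 even + (pvUnpack16 odd <<< (16 : Nat))

-- ===== PRECONDITION & SPEC =====
def Spec_rsub16 (rs1 : Int) (rs2 : Int) (out : Int) : Prop := out = rsub16_alt rs1 rs2
instance (rs1 : Int) (rs2 : Int) (out : Int) : Decidable (Spec_rsub16 rs1 rs2 out) := by unfold Spec_rsub16; infer_instance

-- ===== CLAIM (what is proved, stated in full; the proofs are below) =====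
def Claim_equal_rsub16 : Prop := ∀ (rs1 : Int) (rs2 : Int), Dom_rsub16 rs1 rs2 → Spec_rsub16 rs1 rs2 (rsub16 rs1 rs2)

-- ===== LEMMAS AND PROOFS =====

-- the common per-lane value, as plain arithmetic on the lane residues
def pvLane (u v : Int) : Int :=
  ((u % 65536 + (u % 65536 / 32768) * 65536) + 131072
    - (v % 65536 + (v % 65536 / 32768) * 65536)) / 2 % 65536

-- A's per-lane computation
def pvLaneA (u v : Int) : Int :=
  PySem.Int.band ((pvSignExtend16to17 (PySem.Int.band u 65535)
    - pvSignExtend16to17 (PySem.Int.band v 65535)) >>> (1 : Nat)) 65535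

theorem pv_nat_and_mask (n : Nat) : n &&& 65535 = n % 65536 := by
  have h := Nat.and_two_pow_sub_one_eq_mod n 16
  norm_num at h
  exact h

theorem pv_band_mask (a : Int) : PySem.Int.band a 65535 = a % 65536 := by
  rw [PySem.Int.band.eq_1]
  by_cases ha : (0 : Int) ≤ a
  · simp only [ha, if_true, show ((0:Int) ≤ 65535) from by norm_num, if_true]
    rw [show ((65535:Int).toNat) = 65535 from rfl, pv_nat_and_mask]
    omega
  · simp only [ha, if_false, show ((0:Int) ≤ 65535) from by norm_num, if_true]
    rw [show ((65535:Int).toNat) = 65535 from rfl, Nat.and_comm, pv_nat_and_mask]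
    omega

theorem pv_nat_or_disjoint (a b k : Nat) (h : b < 2 ^ k) : a * 2 ^ k ||| b = a * 2 ^ k + b := by
  apply Nat.eq_of_testBit_eq
  intro i
  have h1 := Nat.testBit_two_pow_mul_add a h i
  have h0 := Nat.testBit_two_pow_mul_add a (b := 0) (i := k) (by positivity) i
  rw [Nat.mul_comm] at h1 h0
  simp only [Nat.add_zero] at h0
  rw [Nat.testBit_lor, h1, h0]
  by_cases hi : i < k
  · simp [hi]
  · simp [hi, Nat.testBit_lt_two_pow (show b < 2 ^ i from lt_of_lt_of_le h (Nat.pow_le_pow_right (by norm_num) (by omega)))]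

theorem pv_bor_disjoint (a b : Int) (k : Nat) (ha : 0 ≤ a) (hb : 0 ≤ b) (h : b < 2 ^ k) :
    PySem.Int.bor (a * 2 ^ k) b = a * 2 ^ k + b := by
  rw [PySem.Int.bor_of_nonneg (by positivity) hb]
  have : (a * 2 ^ k).toNat = a.toNat * 2 ^ k := by
    rw [Int.toNat_mul ha (by positivity)]
    rw [show ((2:Int) ^ k) = ((2 ^ k : Nat) : Int) from by push_cast; ring, Int.toNat_natCast]
  have hbk : b.toNat < 2 ^ k := by
    zify
    rw [Int.toNat_of_nonneg hb]
    exact h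
  rw [this, pv_nat_or_disjoint a.toNat b.toNat k hbk]
  push_cast [Int.toNat_of_nonneg ha, Int.toNat_of_nonneg hb]
  ring

theorem pv_se_eq (v : Int) (h0 : 0 ≤ v) (h1 : v < 65536) :
    pvSignExtend16to17 v = if 32768 ≤ v then v + 65536 else v := by
  unfold pvSignExtend16to17
  have hband : PySem.Int.band v 32768 = if 32768 ≤ v then 32768 else 0 := by
    rw [PySem.Int.band_of_nonneg h0 (by norm_num),
        show ((32768 : Int).toNat) = 2 ^ 15 from rfl,
        Nat.and_two_pow, Nat.testBit_eq_decide_div_mod_eq,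
        show ((2:Nat) ^ 15) = 32768 from by norm_num]
    by_cases hv : 32768 ≤ v
    · have hd : v.toNat / 32768 % 2 = 1 := by omega
      simp [hd, hv]
    · have hd : v.toNat / 32768 % 2 = 0 := by omega
      simp [hd, hv]
  rw [hband]
  by_cases hv : 32768 ≤ v
  · rw [if_pos hv, if_pos (by norm_num), PySem.Int.bor_of_nonneg h0 (by norm_num),
        show ((65536 : Int).toNat) = 2 ^ 16 from rfl]
    have hor : v.toNat ||| 2 ^ 16 = v.toNat + 2 ^ 16 := by
      rw [Nat.lor_comm]
      have h2 := pv_nat_or_disjoint 1 v.toNat 16 (by omega)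
      simp only [one_mul] at h2
      omega
    rw [hor]
    omega
  · simp [hv]

-- A's lane equals the common arithmetic lane value
theorem pv_laneA_eq (u v : Int) : pvLaneA u v = pvLane u v := by
  unfold pvLaneA pvLane
  simp only [pv_band_mask]
  rw [pv_se_eq _ (Int.emod_nonneg u (by norm_num)) (Int.emod_lt_of_pos u (by norm_num)),
      pv_se_eq _ (Int.emod_nonneg v (by norm_num)) (Int.emod_lt_of_pos v (by norm_num)),
      Int.shiftRight_eq_div_pow]
  norm_num
  split_ifs <;> omega

theorem pv_lane_bounds (u v : Int) : 0 ≤ pvLane u v ∧ pvLane u v < 65536 :=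
  ⟨Int.emod_nonneg _ (by norm_num), Int.emod_lt_of_pos _ (by norm_num)⟩

theorem pv_bor_disjoint_c (a b c : Int) (k : Nat) (hc : c = 2 ^ k)
    (ha : 0 ≤ a) (hb0 : 0 ≤ b) (hb : b < c) :
    PySem.Int.bor (a * c) b = a * c + b := by
  subst hc
  exact pv_bor_disjoint a b k ha hb0 hb

theorem pv_bor_disjoint_rc (b a c : Int) (k : Nat) (hc : c = 2 ^ k)
    (hb0 : 0 ≤ b) (hb : b < c) (ha : 0 ≤ a) :
    PySem.Int.bor b (a * c) = a * c + b := by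
  rw [PySem.Int.bor_comm]
  exact pv_bor_disjoint_c a b c k hc ha hb0 hb

theorem pv_bor_zero_left (b : Int) (hb : 0 ≤ b) : PySem.Int.bor 0 b = b := by
  rw [PySem.Int.bor_of_nonneg le_rfl hb]
  simp
  omega

-- bridges between Int-exponent and Nat-exponent shifts at the literal amounts A uses
theorem pv_r0 (m : Int) : m >>> (0 : Int) = m >>> (0 : Nat) := by
  have h := Int.shiftRight_natCast_right m 0
  norm_num at h ⊢
  exact h
theorem pv_r16 (m : Int) : m >>> (16 : Int) = m >>> (16 : Nat) := by
  have h := Int.shiftRight_natCast_right m 16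
  norm_num at h
  exact h
theorem pv_r32 (m : Int) : m >>> (32 : Int) = m >>> (32 : Nat) := by
  have h := Int.shiftRight_natCast_right m 32
  norm_num at h
  exact h
theorem pv_r48 (m : Int) : m >>> (48 : Int) = m >>> (48 : Nat) := by
  have h := Int.shiftRight_natCast_right m 48
  norm_num at h
  exact h
theorem pv_l0 (m : Int) : m <<< (0 : Int) = m <<< (0 : Nat) := by
  have h := Int.shiftLeft_natCast_right m 0
  norm_num at h ⊢
  exact h
theorem pv_l16 (m : Int) : m <<< (16 : Int) = m <<< (16 : Nat) := by
  have h := Int.shiftLeft_natCast_right m 16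
  norm_num at h
  exact h
theorem pv_l32 (m : Int) : m <<< (32 : Int) = m <<< (32 : Nat) := by
  have h := Int.shiftLeft_natCast_right m 32
  norm_num at h
  exact h
theorem pv_l48 (m : Int) : m <<< (48 : Int) = m <<< (48 : Nat) := by
  have h := Int.shiftLeft_natCast_right m 48
  norm_num at h
  exact h

theorem pv_rnat0 (m : Int) : m >>> (0 : Nat) = m := by
  simp [Int.shiftRight_eq_div_pow]
theorem pv_lnat0 (m : Int) : m <<< (0 : Nat) = m := by
  simp [Int.shiftLeft_eq]

-- A unfolds to the sum of its four lanes
theorem pv_A_sum (rs1 rs2 : Int) :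
    rsub16 rs1 rs2 =
      pvLane rs1 rs2 + pvLane (rs1 >>> (16 : Nat)) (rs2 >>> (16 : Nat)) * 65536
        + pvLane (rs1 >>> (32 : Nat)) (rs2 >>> (32 : Nat)) * 4294967296
        + pvLane (rs1 >>> (48 : Nat)) (rs2 >>> (48 : Nat)) * 281474976710656 := by
  have h : rsub16 rs1 rs2 = PySem.Int.bor (PySem.Int.bor (PySem.Int.bor (PySem.Int.bor 0
      (pvLaneA rs1 rs2 <<< (0 : Nat)))
      (pvLaneA (rs1 >>> (16 : Nat)) (rs2 >>> (16 : Nat)) <<< (16 : Nat)))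
      (pvLaneA (rs1 >>> (32 : Nat)) (rs2 >>> (32 : Nat)) <<< (32 : Nat)))
      (pvLaneA (rs1 >>> (48 : Nat)) (rs2 >>> (48 : Nat)) <<< (48 : Nat)) := by
    simp only [rsub16, pvLaneA, show List.range 4 = [0, 1, 2, 3] from rfl]
    norm_num
    simp only [pv_r0, pv_r16, pv_r32, pv_r48, pv_l0, pv_l16, pv_l32, pv_l48,
      pv_rnat0, pv_lnat0]
  rw [h]
  simp only [pv_laneA_eq, Int.shiftLeft_eq]
  norm_num
  rw [pv_bor_zero_left _ (pv_lane_bounds rs1 rs2).1]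
  rw [pv_bor_disjoint_rc _ _ 65536 16 (by norm_num) (pv_lane_bounds rs1 rs2).1
    (by have := pv_lane_bounds rs1 rs2; omega) (pv_lane_bounds _ _).1]
  rw [pv_bor_disjoint_rc _ _ 4294967296 32 (by norm_num)
    (by have h0 := pv_lane_bounds rs1 rs2
        have h1 := pv_lane_bounds (rs1 >>> (16 : Nat)) (rs2 >>> (16 : Nat))
        omega)
    (by have h0 := pv_lane_bounds rs1 rs2
        have h1 := pv_lane_bounds (rs1 >>> (16 : Nat)) (rs2 >>> (16 : Nat))
        omega)
    (pv_lane_bounds _ _).1]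
  rw [pv_bor_disjoint_rc _ _ 281474976710656 48 (by norm_num)
    (by have h0 := pv_lane_bounds rs1 rs2
        have h1 := pv_lane_bounds (rs1 >>> (16 : Nat)) (rs2 >>> (16 : Nat))
        have h2 := pv_lane_bounds (rs1 >>> (32 : Nat)) (rs2 >>> (32 : Nat))
        omega)
    (by have h0 := pv_lane_bounds rs1 rs2
        have h1 := pv_lane_bounds (rs1 >>> (16 : Nat)) (rs2 >>> (16 : Nat))
        have h2 := pv_lane_bounds (rs1 >>> (32 : Nat)) (rs2 >>> (32 : Nat))
        omega)
    (pv_lane_bounds _ _).1]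
  ring

-- the packed word is the two 17-bit sign-extended slot values
theorem pv_pack17_eq (v : Int) :
    pvPack17 v = (v % 65536 + (v % 65536 / 32768) * 65536)
      + (v >>> (32 : Nat) % 65536 + (v >>> (32 : Nat) % 65536 / 32768) * 65536) * 4294967296 := by
  unfold pvPack17
  simp only [PySem.Int.mod_eq_emod_of_pos (show (0:Int) < 65536 by norm_num),
    Int.shiftRight_eq_div_pow, Int.shiftLeft_eq]
  norm_num

-- halving + unpacking a two-slot word, slotwise
theorem pv_unpack_half (s0 s2 : Int) (h00 : 0 ≤ s0) (h01 : s0 < 262144)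
    (_h20 : 0 ≤ s2) (_h21 : s2 < 262144) :
    pvUnpack16 ((s0 + s2 * 4294967296) >>> (1 : Nat)) =
      s0 / 2 % 65536 + (s2 / 2 % 65536) * 4294967296 := by
  unfold pvUnpack16
  simp only [PySem.Int.mod_eq_emod_of_pos (show (0:Int) < 65536 by norm_num),
    Int.shiftRight_eq_div_pow, Int.shiftLeft_eq]
  norm_num
  omega

-- one biased wide subtraction + halving handles the two lanes of one parity
theorem pv_half_lane (u v : Int) :
    pvUnpack16 ((pvPack17 u + (((1 : Int) <<< (17 : Nat)) + ((1 : Int) <<< (49 : Nat))) - pvPack17 v) >>> (1 : Nat)) =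
      pvLane u v + pvLane (u >>> (32 : Nat)) (v >>> (32 : Nat)) * 4294967296 := by
  have hu0 := Int.emod_nonneg u (show (65536:Int) ≠ 0 by norm_num)
  have hu1 := Int.emod_lt_of_pos u (show (0:Int) < 65536 by norm_num)
  have hv0 := Int.emod_nonneg v (show (65536:Int) ≠ 0 by norm_num)
  have hv1 := Int.emod_lt_of_pos v (show (0:Int) < 65536 by norm_num)
  have hu0' := Int.emod_nonneg (u >>> (32:Nat)) (show (65536:Int) ≠ 0 by norm_num)
  have hu1' := Int.emod_lt_of_pos (u >>> (32:Nat)) (show (0:Int) < 65536 by norm_num)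
  have hv0' := Int.emod_nonneg (v >>> (32:Nat)) (show (65536:Int) ≠ 0 by norm_num)
  have hv1' := Int.emod_lt_of_pos (v >>> (32:Nat)) (show (0:Int) < 65536 by norm_num)
  have harg : pvPack17 u + (((1 : Int) <<< (17 : Nat)) + ((1 : Int) <<< (49 : Nat))) - pvPack17 v =
      ((u % 65536 + (u % 65536 / 32768) * 65536) + 131072 - (v % 65536 + (v % 65536 / 32768) * 65536))
        + ((u >>> (32 : Nat) % 65536 + (u >>> (32 : Nat) % 65536 / 32768) * 65536) + 131072
            - (v >>> (32 : Nat) % 65536 + (v >>> (32 : Nat) % 65536 / 32768) * 65536)) * 4294967296 := by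
    rw [pv_pack17_eq u, pv_pack17_eq v]
    norm_num [Int.shiftLeft_eq]
    ring
  rw [harg, pv_unpack_half _ _ (by omega) (by omega) (by omega) (by omega)]
  unfold pvLane
  ring_nf

-- B unfolds to the same sum of four lanes
theorem pv_B_sum (rs1 rs2 : Int) :
    rsub16_alt rs1 rs2 =
      pvLane rs1 rs2 + pvLane (rs1 >>> (16 : Nat)) (rs2 >>> (16 : Nat)) * 65536
        + pvLane (rs1 >>> (32 : Nat)) (rs2 >>> (32 : Nat)) * 4294967296
        + pvLane (rs1 >>> (48 : Nat)) (rs2 >>> (48 : Nat)) * 281474976710656 := by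
  have hsh : ∀ a : Int, a >>> (16 : Nat) >>> (32 : Nat) = a >>> (48 : Nat) := by
    intro a
    simp [Int.shiftRight_eq_div_pow, Int.ediv_ediv_of_nonneg]
  show pvUnpack16 _ + (pvUnpack16 _ <<< (16 : Nat)) = _
  rw [pv_half_lane rs1 rs2, pv_half_lane (rs1 >>> (16 : Nat)) (rs2 >>> (16 : Nat)), hsh, hsh,
    Int.shiftLeft_eq]
  norm_num
  ring

-- ===== VERDICT (by name: the statement is the Claim_ definition above) =====
theorem rsub16_spec : Claim_equal_rsub16 := by
  intro rs1 rs2 _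
  unfold Spec_rsub16
  rw [pv_A_sum, pv_B_sum]
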